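-- pv_equiv track=rewrite | github.com/Maveriick123/KeleaCare2 | app/analysis.py | find_lowest_and_second_lowest
-- ===== SOURCE A (Python) =====
-- def find_lowest_and_second_lowest(arr):
--     if len(arr) < 2:
--         return None  # Not enough elements to find both lowest and second lowest
--
--     lowest_index = second_lowest_index = -1
--     lowest_value = second_lowest_value = float('inf')
--
--     for i, value in enumerate(arr):
--         if value < lowest_value:
--             second_lowest_value = lowest_value
--             second_lowest_index = lowest_index
--             lowest_value = value
--             lowest_index = i
--         elif value < second_lowest_value and value != lowest_value:
--             second_lowest_value = value
--             second_lowest_index = i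
--
--     return lowest_index, second_lowest_index
-- ===== SOURCE B (Python) =====
-- def find_lowest_and_second_lowest(arr):
--     if len(arr) < 2:
--         return None
--
--     lowest_index = -1
--     lowest_value = float('inf')
--     for i, v in enumerate(arr):
--         if v < lowest_value:
--             lowest_value = v
--             lowest_index = i
--
--     second_index = -1
--     second_value = float('inf')
--     for i, v in enumerate(arr):
--         if v < second_value and v != lowest_value:
--             second_value = v
--             second_index = i
--
--     return lowest_index, second_index
-- ===== Notes on version B (the rewrite author's own statement) =====
-- stated objective: simpler
-- what changed: Replaces A's single interleaved scan with a demoting 4-field state by two independent plain min-scans: one finds the minimum and its first index, a second finds the smallest value distinct from that minimum and its first index.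
import Mathlib
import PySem

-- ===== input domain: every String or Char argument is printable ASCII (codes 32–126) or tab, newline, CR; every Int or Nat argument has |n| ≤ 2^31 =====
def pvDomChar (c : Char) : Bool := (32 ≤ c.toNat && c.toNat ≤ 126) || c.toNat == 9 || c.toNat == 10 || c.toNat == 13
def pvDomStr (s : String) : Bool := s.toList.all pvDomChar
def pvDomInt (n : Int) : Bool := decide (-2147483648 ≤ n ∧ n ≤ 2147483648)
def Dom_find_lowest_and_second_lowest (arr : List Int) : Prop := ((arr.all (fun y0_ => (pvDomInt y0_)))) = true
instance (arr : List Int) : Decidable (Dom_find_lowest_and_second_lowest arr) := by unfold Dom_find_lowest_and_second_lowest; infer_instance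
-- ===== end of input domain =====

-- B replaces A's single interleaved demoting scan by two independent min-scans (objective: simpler).

-- float('inf') is modelled as `none`: every Int is < inf and ≠ inf.
def pvLtO (v : Int) (o : Option Int) : Bool := match o with | none => true | some w => decide (v < w)
def pvNeO (v : Int) (o : Option Int) : Bool := match o with | none => true | some w => decide (v ≠ w)

-- ===== PORT A =====
-- state = (lowest_index, second_lowest_index, lowest_value, second_lowest_value)
def pvStepA (st : Int × Int × Option Int × Option Int) (p : Int × Int) :
    Int × Int × Option Int × Option Int :=
  if pvLtO p.2 st.2.2.1 then (p.1, st.1, some p.2, st.2.2.1)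
  else if pvLtO p.2 st.2.2.2 && pvNeO p.2 st.2.2.1 then (st.1, p.1, st.2.2.1, some p.2)
  else st

def find_lowest_and_second_lowest (arr : List Int) : Option (Int × Int) :=
  if arr.length < 2 then none
  else
    let st := (PySem.List.enumerate arr 0).foldl pvStepA (-1, -1, none, none)
    some (st.1, st.2.1)

-- ===== PORT B =====
-- first pass: (lowest_index, lowest_value)
def pvStepB1 (st : Int × Option Int) (p : Int × Int) : Int × Option Int :=
  if pvLtO p.2 st.2 then (p.1, some p.2) else st

-- second pass: (second_index, second_value), given the lowest value
def pvStepB2 (lv : Option Int) (st : Int × Option Int) (p : Int × Int) : Int × Option Int :=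
  if pvLtO p.2 st.2 && pvNeO p.2 lv then (p.1, some p.2) else st

def find_lowest_and_second_lowest_alt (arr : List Int) : Option (Int × Int) :=
  if arr.length < 2 then none
  else
    let f := (PySem.List.enumerate arr 0).foldl pvStepB1 (-1, none)
    let s := (PySem.List.enumerate arr 0).foldl (pvStepB2 f.2) (-1, none)
    some (f.1, s.1)

-- ===== PRECONDITION & SPEC =====
def Spec_find_lowest_and_second_lowest (arr : List Int) (out : Option (Int × Int)) : Prop := out = find_lowest_and_second_lowest_alt arr
instance (arr : List Int) (out : Option (Int × Int)) : Decidable (Spec_find_lowest_and_second_lowest arr out) := by unfold Spec_find_lowest_and_second_lowest; infer_instance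

-- ===== CLAIM (what is proved, stated in full; the proofs are below) =====
def Claim_equal_find_lowest_and_second_lowest : Prop := ∀ (arr : List Int), Dom_find_lowest_and_second_lowest arr → Spec_find_lowest_and_second_lowest arr (find_lowest_and_second_lowest arr)

-- ===== LEMMAS AND PROOFS =====

-- pass-1 result only improves: a `some` bound never grows
theorem pvB1_mono (l : List (Int × Int)) :
    ∀ (st : Int × Option Int) (m : Int), st.2 = some m →
      ∃ m', (l.foldl pvStepB1 st).2 = some m' ∧ m' ≤ m := by
  induction l with
  | nil => intro st m h; exact ⟨m, h, le_refl m⟩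
  | cons p l ih =>
    intro st m h
    simp only [List.foldl_cons]
    unfold pvStepB1
    by_cases hlt : pvLtO p.2 st.2 = true
    · simp only [hlt, if_pos]
      obtain ⟨m', hm', hle⟩ := ih (p.1, some p.2) p.2 rfl
      refine ⟨m', hm', le_trans hle ?_⟩
      unfold pvLtO at hlt
      rw [h] at hlt
      simp at hlt
      exact le_of_lt hlt
    · simp [hlt]
      exact ih st m h

-- the pass-1 minimum is ≤ every scanned value
theorem pvB1_le (l : List (Int × Int)) :
    ∀ (st : Int × Option Int) (p : Int × Int), p ∈ l →
      ∃ m, (l.foldl pvStepB1 st).2 = some m ∧ m ≤ p.2 := by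
  induction l with
  | nil => intro st p hp; cases hp
  | cons q l ih =>
    intro st p hp
    simp only [List.foldl_cons]
    rcases List.mem_cons.mp hp with h | h
    · subst h
      -- after scanning p the bound is some m0 with m0 ≤ p.2
      have : ∃ m0, (pvStepB1 st p).2 = some m0 ∧ m0 ≤ p.2 := by
        unfold pvStepB1 pvLtO
        cases hsv : st.2 with
        | none => exact ⟨p.2, by simp, le_refl _⟩
        | some w =>
          by_cases hw : p.2 < w
          · exact ⟨p.2, by simp [hw], le_refl _⟩
          · exact ⟨w, by simp [hsv, hw], le_of_not_gt hw⟩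
      obtain ⟨m0, hm0, hle0⟩ := this
      obtain ⟨m', hm', hle'⟩ := pvB1_mono l _ m0 hm0
      exact ⟨m', hm', le_trans hle' hle0⟩
    · exact ih _ p h

-- if v is below everything in l, pass 2 with lowest = v behaves exactly like pass 1
theorem pvB2_eq_B1 (v : Int) (l : List (Int × Int)) :
    ∀ (st : Int × Option Int), (∀ p ∈ l, v < p.2) →
      l.foldl (pvStepB2 (some v)) st = l.foldl pvStepB1 st := by
  induction l with
  | nil => intro st _; rfl
  | cons p l ih =>
    intro st hall
    have hv : v < p.2 := hall p (List.mem_cons_self)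
    simp only [List.foldl_cons]
    have hne : pvNeO p.2 (some v) = true := by
      unfold pvNeO; simp; omega
    have hstep : pvStepB2 (some v) st p = pvStepB1 st p := by
      unfold pvStepB2 pvStepB1
      rw [hne]; simp
    rw [hstep]
    exact ih _ (fun q hq => hall q (List.mem_cons_of_mem _ hq))

-- main invariant: A's fold = (pass1, pass2-with-pass1's-min), componentwise
theorem pvMain (l : List (Int × Int)) :
    l.foldl pvStepA (-1, -1, none, none) =
      ((l.foldl pvStepB1 (-1, none)).1,
       (l.foldl (pvStepB2 (l.foldl pvStepB1 (-1, none)).2) (-1, none)).1,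
       (l.foldl pvStepB1 (-1, none)).2,
       (l.foldl (pvStepB2 (l.foldl pvStepB1 (-1, none)).2) (-1, none)).2) := by
  induction l using List.reverseRecOn with
  | nil => rfl
  | append_singleton l x ih =>
    simp only [List.foldl_append, List.foldl_cons, List.foldl_nil]
    set f := l.foldl pvStepB1 (-1, none) with hf
    set s := l.foldl (pvStepB2 f.2) (-1, none) with hs
    rw [ih]
    by_cases hlt : pvLtO x.2 f.2 = true
    · -- new overall minimum: pass1 updates, pass2 over l with new lowest equals pass1 over l
      have hall : ∀ p ∈ l, x.2 < p.2 := by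
        intro p hp
        obtain ⟨m, hm, hle⟩ := pvB1_le l (-1, none) p hp
        rw [← hf] at hm
        unfold pvLtO at hlt
        rw [hm] at hlt
        simp at hlt
        omega
      have h1 : pvStepB1 f x = (x.1, some x.2) := by unfold pvStepB1; rw [hlt]; simp
      have h2 : l.foldl (pvStepB2 (some x.2)) (-1, none) = f := by
        rw [hf]; exact pvB2_eq_B1 x.2 l (-1, none) hall
      unfold pvStepA pvStepB1
      rw [hlt]
      simp only [if_pos]
      rw [h2]
      have hstep2 : pvStepB2 (some x.2) f x = f := by
        unfold pvStepB2 pvNeO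
        simp
      rw [hstep2]
    · -- minimum unchanged: pass1 keeps f; A's elif is exactly pass 2's step
      have h1 : pvStepB1 f x = f := by unfold pvStepB1; rw [Bool.not_eq_true] at hlt; simp [hlt]
      rw [h1, ← hs]
      unfold pvStepA pvStepB2
      rw [Bool.not_eq_true] at hlt
      simp only [hlt]
      by_cases hc : (pvLtO x.2 s.2 && pvNeO x.2 f.2) = true
      · simp [hc]
      · simp [hc]

-- ===== VERDICT (by name: the statement is the Claim_ definition above) =====
theorem find_lowest_and_second_lowest_spec : Claim_equal_find_lowest_and_second_lowest := by
  intro arr _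
  unfold Spec_find_lowest_and_second_lowest find_lowest_and_second_lowest find_lowest_and_second_lowest_alt
  by_cases h : arr.length < 2
  · simp [h]
  · simp only [h, ite_false]
    rw [pvMain (PySem.List.enumerate arr 0)]
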